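-- pv_equiv track=rewrite | github.com/eduardoishimaru/cursoPython | Seção 04/aula80 copy.py | encontraDuplicado
-- ===== SOURCE A (Python) =====
-- def encontraDuplicado(lista):
--     checklista = set()
--     primeiroDuplicado = -1
--     for validaNumero in lista:
--         if validaNumero in checklista:
--             primeiroDuplicado = validaNumero
--             break
--
--         checklista.add(validaNumero)
--
--     return primeiroDuplicado
-- ===== SOURCE B (Python) =====
-- def encontraDuplicado(lista):
--     # staged: collect every "second occurrence" position (index whose closed
--     # prefix contains its value exactly twice), then answer at the minimal one
--     seconds = [i for i in range(len(lista)) if lista[:i + 1].count(lista[i]) == 2]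
--     if not seconds:
--         return -1
--     return lista[min(seconds)]
-- ===== Notes on version B (the rewrite author's own statement) =====
-- stated objective: alternative
-- what changed: Replaces A's single early-exit pass with a maintained seen-set by a staged counting algorithm: B first computes the list of all second-occurrence positions (indices whose closed prefix contains their value exactly twice) and then returns the element at the minimal such position, or -1 if the list is empty.
import Mathlib
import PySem

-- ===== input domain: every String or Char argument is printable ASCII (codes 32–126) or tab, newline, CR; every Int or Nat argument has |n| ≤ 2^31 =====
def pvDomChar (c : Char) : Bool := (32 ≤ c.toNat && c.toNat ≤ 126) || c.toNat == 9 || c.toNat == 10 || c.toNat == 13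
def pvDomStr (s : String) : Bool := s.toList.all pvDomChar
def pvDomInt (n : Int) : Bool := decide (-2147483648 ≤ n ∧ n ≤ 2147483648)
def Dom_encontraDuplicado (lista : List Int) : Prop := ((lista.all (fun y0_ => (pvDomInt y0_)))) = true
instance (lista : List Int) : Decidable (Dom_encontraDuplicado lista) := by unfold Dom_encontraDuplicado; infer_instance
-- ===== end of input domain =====

-- B replaces A's early-exit seen-set pass by a staged counting algorithm: collect all
-- second-occurrence positions (closed prefix contains the value exactly twice), answer at the minimum.


-- ===== PORT A =====
-- loop over lista with the 'checklista' set; break returns the duplicate, else the initial -1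
def encALoop (checklista : PySem.Set Int) (rest : List Int) : Int :=
  match rest with
  | [] => -1
  | validaNumero :: xs =>
    if PySem.Set.contains checklista validaNumero then validaNumero
    else encALoop (PySem.Set.add checklista validaNumero) xs

def encontraDuplicado (lista : List Int) : Int :=
  encALoop PySem.Set.empty lista

-- ===== PORT B =====
-- seconds = [i for i in range(len(lista)) if lista[:i+1].count(lista[i]) == 2]
-- (the indices i and min(seconds) are always in range, so lista[...] is ported as pyGetD with an unreachable default)
def encSeconds (lista : List Int) : List Int :=
  (PySem.List.pyRange 0 (PySem.List.len lista) 1).filter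
    (fun i => PySem.List.count (PySem.List.slice lista none (some (i + 1))) (PySem.List.pyGetD lista i 0) == 2)

def encontraDuplicado_alt (lista : List Int) : Int :=
  match PySem.List.min? (encSeconds lista) (fun x => x) with
  | none => -1
  | some j => PySem.List.pyGetD lista j 0

-- ===== PRECONDITION & SPEC =====
def Spec_encontraDuplicado (lista : List Int) (out : Int) : Prop := out = encontraDuplicado_alt lista
instance (lista : List Int) (out : Int) : Decidable (Spec_encontraDuplicado lista out) := by unfold Spec_encontraDuplicado; infer_instance

-- ===== CLAIM (what is proved, stated in full; the proofs are below) =====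
def Claim_equal_encontraDuplicado : Prop := ∀ (lista : List Int), Dom_encontraDuplicado lista → Spec_encontraDuplicado lista (encontraDuplicado lista)

-- ===== LEMMAS AND PROOFS =====

-- "index k is a repeat of an earlier element" — what A's loop detects
def dupB (l : List Int) (k : Nat) : Bool := decide (l.getD k 0 ∈ l.take k)
-- "index k is a second occurrence" — what B's comprehension tests
def predB (l : List Int) (k : Nat) : Bool := (l.take (k + 1)).count (l.getD k 0) == 2

-- forward index scan equivalent to A's loop
def aScan (l : List Int) (i : Nat) : Int :=
  if h : i < l.length then
    if l.getD i 0 ∈ l.take i then l.getD i 0 else aScan l (i + 1)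
  else -1
termination_by l.length - i

lemma enc_main (rest pre : List Int) :
    encALoop (PySem.Set.ofList pre) rest = aScan (pre ++ rest) pre.length := by
  induction rest generalizing pre with
  | nil =>
    rw [encALoop, aScan]
    simp
  | cons x xs ih =>
    rw [encALoop, aScan]
    have hlen : pre.length < (pre ++ x :: xs).length := by simp
    have hget : (pre ++ x :: xs).getD pre.length 0 = x := by
      rw [List.getD_eq_getElem _ _ hlen]
      simp [List.getElem_append_right]
    have htake : (pre ++ x :: xs).take pre.length = pre := by
      simp
    rw [dif_pos hlen]
    simp only [hget, htake]
    by_cases hmem : x ∈ pre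
    · rw [if_pos (by simpa [PySem.Set.contains] using hmem), if_pos hmem]
    · rw [if_neg (by simpa [PySem.Set.contains] using hmem), if_neg hmem]
      have h1 : PySem.Set.add (PySem.Set.ofList pre) x = PySem.Set.ofList (pre ++ [x]) := by
        simp [PySem.Set.ofList_eq_foldl, List.foldl_append]
      have h2 := ih (pre ++ [x])
      rw [h1, h2]
      simp

lemma aScan_eq_neg (l : List Int) (i : Nat)
    (h : ∀ k, i ≤ k → k < l.length → ¬ dupB l k = true) : aScan l i = -1 := by
  suffices H : ∀ d i, l.length ≤ i + d → (∀ k, i ≤ k → k < l.length → ¬ dupB l k = true) →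
      aScan l i = -1 by
    exact H l.length i (by omega) h
  intro d
  induction d with
  | zero =>
    intro i hi _
    rw [aScan, dif_neg (by omega)]
  | succ d ih =>
    intro i hi h
    rw [aScan]
    by_cases hlt : i < l.length
    · rw [dif_pos hlt, if_neg (by simpa [dupB] using h i le_rfl hlt)]
      exact ih (i + 1) (by omega) (fun k hk1 hk2 => h k (by omega) hk2)
    · rw [dif_neg hlt]

lemma aScan_eq_pos (l : List Int) (i j : Nat) (hij : i ≤ j) (hj : j < l.length)
    (hd : dupB l j = true) (hmin : ∀ k, i ≤ k → k < j → ¬ dupB l k = true) :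
    aScan l i = l.getD j 0 := by
  suffices H : ∀ d i, j ≤ i + d → i ≤ j → (∀ k, i ≤ k → k < j → ¬ dupB l k = true) →
      aScan l i = l.getD j 0 by
    exact H j i (by omega) hij hmin
  intro d
  induction d with
  | zero =>
    intro i h0 hij _
    have : i = j := by omega
    subst this
    rw [aScan, dif_pos hj, if_pos (by simpa [dupB] using hd)]
  | succ d ih =>
    intro i h0 hij hmin
    rcases eq_or_lt_of_le hij with rfl | hlt
    · rw [aScan, dif_pos hj, if_pos (by simpa [dupB] using hd)]
    · rw [aScan, dif_pos (by omega), if_neg (by simpa [dupB] using hmin i le_rfl hlt)]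
      exact ih (i + 1) (by omega) (by omega) (fun k hk1 hk2 => hmin k (by omega) hk2)

lemma A_char (l : List Int) :
    encontraDuplicado l =
      match (List.range l.length).find? (dupB l) with
      | none => -1
      | some j => l.getD j 0 := by
  have h0 := enc_main l []
  simp only [List.nil_append, List.length_nil] at h0
  unfold encontraDuplicado
  rw [show (PySem.Set.empty : PySem.Set Int) = PySem.Set.ofList [] from rfl, h0]
  cases hf : (List.range l.length).find? (dupB l) with
  | none =>
    rw [List.find?_eq_none] at hf
    exact aScan_eq_neg l 0 (fun k _ hk => hf k (List.mem_range.mpr hk))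
  | some j =>
    rw [List.find?_eq_some_iff_getElem] at hf
    obtain ⟨hpj, i, hi, hij, hbefore⟩ := hf
    have hii : i = j := by simpa using hij
    subst hii
    exact aScan_eq_pos l 0 i (Nat.zero_le _) (by simpa using hi) hpj
      (fun k _ hk => by simpa using hbefore k hk)

lemma two_le_count_split (a : Int) (xs : List Int) (h : 2 ≤ xs.count a) :
    ∃ s t, xs = s ++ a :: t ∧ a ∈ t := by
  induction xs with
  | nil => simp at h
  | cons x xs ih =>
    by_cases hx : x = a
    · subst hx
      have : 1 ≤ xs.count x := by simpa [List.count_cons_self] using h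
      exact ⟨[], xs, by simp, List.count_pos_iff.mp this⟩
    · have : 2 ≤ xs.count a := by simpa [List.count_cons_of_ne (by simpa using hx)] using h
      obtain ⟨s, t, hst, hat⟩ := ih this
      exact ⟨x :: s, t, by simp [hst], hat⟩

lemma pred_imp_dup (l : List Int) (k : Nat) (hk : k < l.length)
    (h : predB l k = true) : dupB l k = true := by
  have hgd : l.getD k 0 = l[k] := List.getD_eq_getElem l 0 hk
  unfold predB at h
  rw [List.take_succ_eq_append_getElem hk, hgd, List.count_append] at h
  simp at h
  have h1 : 0 < (l.take k).count l[k] := by omega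
  unfold dupB
  rw [hgd]
  simpa using List.count_pos_iff.mp h1

lemma dup_first_imp_pred (l : List Int) (k : Nat) (hk : k < l.length)
    (hd : dupB l k = true) (hmin : ∀ m, m < k → ¬ dupB l m = true) : predB l k = true := by
  have hgd : l.getD k 0 = l[k] := List.getD_eq_getElem l 0 hk
  unfold dupB at hd
  rw [hgd] at hd
  have hmem : l[k] ∈ l.take k := by simpa using hd
  have h1 : 0 < (l.take k).count l[k] := List.count_pos_iff.mpr hmem
  have hle : (l.take k).count l[k] ≤ 1 := by
    by_contra hgt
    obtain ⟨s, t, hst, hat⟩ := two_le_count_split l[k] (l.take k) (by omega)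
    obtain ⟨m, hm, hmt⟩ := List.getElem_of_mem hat
    have hlen : (l.take k).length = k := by rw [List.length_take]; omega
    have hslen : s.length + 1 + t.length = k := by
      rw [hst] at hlen; simpa [Nat.add_assoc, Nat.add_comm, Nat.add_left_comm] using hlen
    have hk2 : s.length + 1 + m < k := by omega
    apply hmin (s.length + 1 + m) hk2
    have hk2len : s.length + 1 + m < l.length := by omega
    unfold dupB
    rw [List.getD_eq_getElem l 0 hk2len]
    have e1 : l[s.length + 1 + m]? = some l[k] := by
      rw [← List.getElem?_take_of_lt (j := k) (by omega), hst,
        List.getElem?_append_right (by omega)]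
      have hsub : s.length + 1 + m - s.length = m + 1 := by omega
      rw [hsub, List.getElem?_cons_succ, List.getElem?_eq_getElem hm, hmt]
    have e1' : l[s.length + 1 + m]'hk2len = l[k] := by
      have := List.getElem?_eq_getElem hk2len
      rw [this] at e1
      exact Option.some.inj e1
    have e2 : (l.take (s.length + 1 + m))[s.length]? = some l[k] := by
      rw [List.getElem?_take_of_lt (by omega), ← List.getElem?_take_of_lt (j := k) (by omega),
        hst, List.getElem?_append_right (le_refl _)]
      simp
    rw [e1']
    simpa using List.mem_of_getElem? e2
  have hc1 : (l.take k).count l[k] = 1 := by omega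
  unfold predB
  rw [List.take_succ_eq_append_getElem hk, hgd, List.count_append, hc1]
  simp

lemma find_eq (l : List Int) :
    (List.range l.length).find? (predB l) = (List.range l.length).find? (dupB l) := by
  cases hf : (List.range l.length).find? (dupB l) with
  | none =>
    rw [List.find?_eq_none] at hf ⊢
    intro k hk hp
    exact hf k hk (pred_imp_dup l k (List.mem_range.mp hk) hp)
  | some j =>
    rw [List.find?_eq_some_iff_getElem] at hf ⊢
    obtain ⟨hpj, i, hi, hij, hbefore⟩ := hf
    have hii : i = j := by simpa using hij
    subst hii
    have hin : i < l.length := by simpa using hi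
    have hminD : ∀ m, m < i → ¬ dupB l m = true := fun m hm => by
      simpa using hbefore m hm
    refine ⟨dup_first_imp_pred l i hin hpj hminD, i, hi, hij, fun m hm => ?_⟩
    simp only [List.getElem_range, Bool.not_eq_eq_eq_not, Bool.not_true]
    by_contra hp
    exact hminD m hm (pred_imp_dup l m (by omega) (by
      cases hq : predB l m
      · exact absurd hq hp
      · rfl))

lemma min?_of_pairwise_lt (xs : List Int) (h : xs.Pairwise (· < ·)) :
    PySem.List.min? xs (fun x => x) = xs.head? := by
  cases xs with
  | nil => simp [PySem.List.min?_eq_none_iff]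
  | cons x t =>
    rw [PySem.List.min?_id_cons]
    have hle := PySem.List.foldl_min_le t x
    have hx : ∀ y ∈ t, x < y := by
      simpa using (List.pairwise_cons.mp h).1
    rcases PySem.List.foldl_min_mem t x with hm | hm
    · simp [hm]
    · exact absurd (lt_of_lt_of_le (hx _ hm) hle.1) (lt_irrefl _)

lemma B_char (l : List Int) :
    encontraDuplicado_alt l =
      match (List.range l.length).find? (predB l) with
      | none => -1
      | some j => l.getD j 0 := by
  unfold encontraDuplicado_alt encSeconds
  rw [PySem.List.len_eq, PySem.List.pyRange_zero_natCast, List.filter_map]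
  have hpred : List.filter
      ((fun i => PySem.List.count (PySem.List.slice l none (some (i + 1)))
        (PySem.List.pyGetD l i 0) == 2) ∘ (fun k : Nat => (k : Int))) (List.range l.length) =
      List.filter (predB l) (List.range l.length) := by
    refine List.filter_congr (fun k _ => ?_)
    simp only [Function.comp]
    rw [show ((k : Int) + 1) = ((k + 1 : Nat) : Int) by push_cast; ring]
    rw [PySem.List.slice_to_natCast, PySem.List.pyGetD_natCast, PySem.List.count_eq]
    rfl
  rw [hpred]
  have hpw : (((List.range l.length).filter (predB l)).map (fun k : Nat => (k : Int))).Pairwise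
      (· < ·) :=
    (List.pairwise_lt_range.filter _).map _ (fun a b hab => by exact_mod_cast hab)
  rw [min?_of_pairwise_lt _ hpw, List.head?_map, List.head?_filter]
  cases hf : (List.range l.length).find? (predB l) with
  | none => simp
  | some j =>
    have hj : j < l.length := List.mem_range.mp (List.mem_of_find?_eq_some hf)
    simp [PySem.List.pyGetD_natCast]

-- ===== VERDICT (by name: the statement is the Claim_ definition above) =====
theorem encontraDuplicado_spec : Claim_equal_encontraDuplicado := by
  intro lista _
  unfold Spec_encontraDuplicado
  rw [A_char, B_char, find_eq]
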